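-- pv_equiv track=rewrite | github.com/mortyc126-debug/SHA | crazy24_carry_dissection.py | add32_multi_with_carries
-- ===== SOURCE A (Python) =====
-- MASK = 0xFFFFFFFF
--
-- def add32_with_carries(a, b):
--     """Compute a+b mod 2^32, return (sum, carry_bits).
--     carry_bits: bit k is set if there's a carry INTO position k+1."""
--     s = (a + b) & MASK
--     # carry bits: where the sum differs from XOR
--     xor_result = a ^ b
--     carry_bits = (s ^ xor_result)  # these are the bits affected by carries
--     # The actual carry-in at each position: carry_in[k] = (s[k] XOR a[k] XOR b[k])
--     # But carry_bits already captures this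
--     return s, carry_bits
--
-- def add32_multi_with_carries(values):
--     """Chain of additions, return (sum, list_of_carry_bits_per_addition)."""
--     if len(values) == 0:
--         return 0, []
--     s = values[0]
--     carries_list = []
--     for v in values[1:]:
--         s, carry = add32_with_carries(s, v)
--         carries_list.append(carry)
--     return s, carries_list
-- ===== SOURCE B (Python) =====
-- MASK = 0xFFFFFFFF
--
-- def add32_multi_with_carries(values):
--     """Two-pass version: prefix masked sums, then carries via the full-adder identity."""
--     if not values:
--         return 0, []
--     sums = [values[0]]
--     for v in values[1:]:
--         sums.append((sums[-1] + v) & MASK)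
--     carries = [sums[i] ^ sums[i - 1] ^ values[i] for i in range(1, len(values))]
--     return sums[-1], carries
-- ===== Notes on version B (the rewrite author's own statement) =====
-- stated objective: alternative
-- what changed: A threads (sum, carries) through one fused loop calling a helper per step; B makes two separate passes: it first builds the list of running masked prefix sums, then derives each carry mask from consecutive prefix sums and the addend via the full-adder identity carry = sum ^ a ^ b, and returns the last prefix sum.
import Mathlib
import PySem

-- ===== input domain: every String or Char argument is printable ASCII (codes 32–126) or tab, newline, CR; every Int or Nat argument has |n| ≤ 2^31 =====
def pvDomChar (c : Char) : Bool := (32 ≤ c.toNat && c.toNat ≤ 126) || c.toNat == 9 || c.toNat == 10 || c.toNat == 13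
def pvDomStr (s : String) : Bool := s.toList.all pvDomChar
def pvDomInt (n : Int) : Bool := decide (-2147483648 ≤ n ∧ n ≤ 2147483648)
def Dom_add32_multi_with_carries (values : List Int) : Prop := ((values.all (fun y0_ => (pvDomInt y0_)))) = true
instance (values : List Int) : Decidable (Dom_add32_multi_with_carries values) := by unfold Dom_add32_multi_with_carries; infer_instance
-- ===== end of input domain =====

-- B replaces A's fused state loop by two separate passes — a prefix-masked-sums list, then carries
-- recovered from consecutive prefix sums by the full-adder identity carry = sum ^ a ^ b (objective: alternative decomposition).

-- ===== PORT A =====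
def MASK : Int := 4294967295

def add32_with_carries (a b : Int) : Int × Int :=
  let s := PySem.Int.band (a + b) MASK
  let xor_result := PySem.Int.bxor a b
  let carry_bits := PySem.Int.bxor s xor_result
  (s, carry_bits)

def add32_multi_with_carries (values : List Int) : Int × List Int :=
  match values with
  | [] => (0, [])
  | v0 :: rest =>
      let st := rest.foldl (fun (acc : Int × List Int) v =>
        let r := add32_with_carries acc.1 v
        (r.1, acc.2 ++ [r.2])) (v0, ([] : List Int))
      (st.1, st.2)

-- ===== PORT B =====
def add32_multi_with_carries_alt (values : List Int) : Int × List Int :=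
  match values with
  | [] => (0, [])
  | v0 :: rest =>
      let sums := rest.foldl (fun (acc : List Int) v =>
        acc ++ [PySem.Int.band (PySem.List.pyGetD acc (-1) 0 + v) MASK]) [v0]
      let carries := (PySem.List.pyRange 1 (values.length : Int) 1).map (fun i =>
        PySem.Int.bxor (PySem.Int.bxor (PySem.List.pyGetD sums i 0)
          (PySem.List.pyGetD sums (i - 1) 0)) (PySem.List.pyGetD values i 0))
      (PySem.List.pyGetD sums (-1) 0, carries)

-- ===== PRECONDITION & SPEC =====
def Spec_add32_multi_with_carries (values : List Int) (out : Int × List Int) : Prop := out = add32_multi_with_carries_alt values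
instance (values : List Int) (out : Int × List Int) : Decidable (Spec_add32_multi_with_carries values out) := by unfold Spec_add32_multi_with_carries; infer_instance

-- ===== CLAIM (what is proved, stated in full; the proofs are below) =====
def Claim_equal_add32_multi_with_carries : Prop := ∀ (values : List Int), Dom_add32_multi_with_carries values → Spec_add32_multi_with_carries values (add32_multi_with_carries values)

-- ===== LEMMAS AND PROOFS =====

theorem bxor_eq_xor (a b : Int) : PySem.Int.bxor a b = Int.xor a b := by
  cases a with
  | ofNat m => cases b with
    | ofNat n => simp [PySem.Int.bxor, Int.xor]
    | negSucc n => simp [PySem.Int.bxor, Int.xor, Int.negSucc_eq]; omega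
  | negSucc m => cases b with
    | ofNat n => simp [PySem.Int.bxor, Int.xor, Int.negSucc_eq]; omega
    | negSucc n => simp [PySem.Int.bxor, Int.xor, Int.negSucc_eq]; omega

theorem bxor_assoc (a b c : Int) : PySem.Int.bxor (PySem.Int.bxor a b) c = PySem.Int.bxor a (PySem.Int.bxor b c) := by
  simp only [bxor_eq_xor]
  cases a <;> cases b <;> cases c <;> simp [Int.xor, Nat.xor_assoc]

theorem pyGetD_neg_one {α : Type} (l : List α) (h : l ≠ []) (d : α) :
    PySem.List.pyGetD l (-1) d = l.getLast h := by
  have hn : 1 ≤ l.length := List.length_pos_of_ne_nil h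
  simp [PySem.List.pyGetD, PySem.List.pyGet?, PySem.List.pyIdx?, hn, List.getLast_eq_getElem]
  rw [List.getElem?_eq_getElem (by omega)]
  rfl

-- common spec forms of the chained addition
def pvScan (s : Int) : List Int → List Int
  | [] => [s]
  | v :: vs => s :: pvScan (PySem.Int.band (s + v) MASK) vs

def pvSum (s : Int) : List Int → Int
  | [] => s
  | v :: vs => pvSum (PySem.Int.band (s + v) MASK) vs

def pvCarries (s : Int) : List Int → List Int
  | [] => []
  | v :: vs =>
      PySem.Int.bxor (PySem.Int.band (s + v) MASK) (PySem.Int.bxor s v) ::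
        pvCarries (PySem.Int.band (s + v) MASK) vs

theorem pvScan_ne_nil (s : Int) (vs : List Int) : pvScan s vs ≠ [] := by
  cases vs <;> simp [pvScan]

theorem length_pvCarries (vs : List Int) : ∀ s, (pvCarries s vs).length = vs.length := by
  induction vs with
  | nil => intro s; simp [pvCarries]
  | cons v vs ih => intro s; simp [pvCarries, ih]

theorem pvScan_getLast (vs : List Int) : ∀ s, (pvScan s vs).getLast (pvScan_ne_nil s vs) = pvSum s vs := by
  induction vs with
  | nil => intro s; simp [pvScan, pvSum]
  | cons v vs ih =>
      intro s
      simp only [pvScan, pvSum]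
      rw [List.getLast_cons (pvScan_ne_nil _ vs)]
      exact ih _

theorem pvCarries_getD (vs : List Int) : ∀ s k, k < vs.length →
    (pvCarries s vs).getD k 0 =
      PySem.Int.bxor (PySem.Int.bxor ((pvScan s vs).getD (k + 1) 0) ((pvScan s vs).getD k 0)) (vs.getD k 0) := by
  induction vs with
  | nil => intro s k h; simp at h
  | cons v vs ih =>
      intro s k h
      cases k with
      | zero =>
          cases vs with
          | nil => simp [pvCarries, pvScan, bxor_assoc]
          | cons w ws => simp [pvCarries, pvScan, bxor_assoc]
      | succ k =>
          simp only [pvCarries, pvScan, List.getD_cons_succ]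
          exact ih _ k (by simpa using h)

-- A's fused loop computes (pvSum, pvCarries)
theorem A_fold (vs : List Int) : ∀ (s : Int) (acc : List Int),
    vs.foldl (fun (acc : Int × List Int) v =>
        let r := add32_with_carries acc.1 v
        (r.1, acc.2 ++ [r.2])) (s, acc) = (pvSum s vs, acc ++ pvCarries s vs) := by
  induction vs with
  | nil => intro s acc; simp [pvSum, pvCarries]
  | cons v vs ih =>
      intro s acc
      simp only [List.foldl_cons, pvSum, pvCarries]
      exact (ih _ _).trans (by simp [add32_with_carries])

-- B's first pass builds the prefix-sum list pvScan
theorem B_fold (vs : List Int) : ∀ (pre : List Int) (s : Int),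
    vs.foldl (fun (acc : List Int) v =>
        acc ++ [PySem.Int.band (PySem.List.pyGetD acc (-1) 0 + v) MASK]) (pre ++ [s]) =
      pre ++ pvScan s vs := by
  induction vs with
  | nil => intro pre s; simp [pvScan]
  | cons v vs ih =>
      intro pre s
      simp only [List.foldl_cons]
      rw [pyGetD_neg_one (pre ++ [s]) (by simp) 0]
      rw [List.getLast_append_of_ne_nil (by simp)]
      rw [ih (pre ++ [s])]
      · simp [pvScan]
      · simp

-- ===== VERDICT (by name: the statement is the Claim_ definition above) =====
theorem add32_multi_with_carries_spec : Claim_equal_add32_multi_with_carries := by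
  intro values _
  unfold Spec_add32_multi_with_carries
  cases values with
  | nil => rfl
  | cons v0 rest =>
      simp only [add32_multi_with_carries, add32_multi_with_carries_alt]
      rw [A_fold]
      have hsums := B_fold rest [] v0
      simp only [List.nil_append] at hsums
      rw [hsums]
      simp only [List.nil_append, Prod.mk.injEq]
      constructor
      · rw [pyGetD_neg_one _ (pvScan_ne_nil v0 rest) 0, pvScan_getLast]
      · -- carries lists, elementwise
        apply List.ext_getElem
        · simp [length_pvCarries, PySem.List.length_pyRange_one]
        · intro k h1 h2
          rw [List.getElem_map, PySem.List.getElem_pyRange_one]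
          have hk : k < rest.length := by
            simpa [length_pvCarries] using h1
          have e2 : (1 : Int) + (k : Int) - 1 = ((k : Nat) : Int) := by ring
          have e1 : (1 : Int) + (k : Int) = ((k + 1 : Nat) : Int) := by push_cast; ring
          rw [e2, PySem.List.pyGetD_natCast, e1, PySem.List.pyGetD_natCast, PySem.List.pyGetD_natCast]
          rw [List.getD_cons_succ]
          rw [List.getElem_eq_getD (fallback := 0), pvCarries_getD rest v0 k hk]
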